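-- pv_equiv track=rewrite | github.com/UlkaBo/goit-python | lesson5/auto_hw5_5.py | get_phone_numbers_for_countries
-- ===== SOURCE A (Python) =====
-- dict_cods = dict(zip('81 65 886 380'.split(),
--                      'JP SG TW UA'.split()))
--
-- def sanitize_phone_number(phone):
--     new_phone = (
--         phone.strip()
--         .removeprefix("+")
--         .replace("(", "")
--         .replace(")", "")
--         .replace("-", "")
--         .replace(" ", "")
--     )
--     return new_phone
--
-- def get_phone_numbers_for_countries(list_phones):
--     dict_phones = dict()
--     for tel in list_phones:
--         tel = sanitize_phone_number(tel)
--         for cod, country in dict_cods.items():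
--             if tel.startswith(cod):
--                 dict_phones[country] = dict_phones.get(country, [])+[tel]
--                 break
--         else:
--             dict_phones['UA'] = dict_phones.get('UA', [])+[tel]
--
--     return dict_phones
-- ===== SOURCE B (Python) =====
-- CODES = [("81", "JP"), ("65", "SG"), ("886", "TW"), ("380", "UA")]
--
-- def sanitize_phone_number(phone):
--     return (
--         phone.strip()
--         .removeprefix("+")
--         .replace("(", "")
--         .replace(")", "")
--         .replace("-", "")
--         .replace(" ", "")
--     )
--
-- def _country(tel):
--     for cod, country in CODES:
--         if tel.startswith(cod):
--             return country
--     return "UA"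
--
-- def get_phone_numbers_for_countries(list_phones):
--     tels = [sanitize_phone_number(p) for p in list_phones]
--     countries = [_country(t) for t in tels]
--     result = {}
--     seen = set()
--     for c in countries:
--         if c not in seen:
--             seen.add(c)
--             result[c] = [t for t, cc in zip(tels, countries) if cc == c]
--     return result
-- ===== Notes on version B (the rewrite author's own statement) =====
-- stated objective: faster
-- what changed: Replaces A's single incremental dict-bucketing fold (which rebuilds a bucket with get(...)+[tel] on every phone, quadratic in a bucket's size) by three shaped passes: sanitize all phones, map each to its country, then emit one (country, filtered-phones) pair per first-seen country.
import Mathlib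
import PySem

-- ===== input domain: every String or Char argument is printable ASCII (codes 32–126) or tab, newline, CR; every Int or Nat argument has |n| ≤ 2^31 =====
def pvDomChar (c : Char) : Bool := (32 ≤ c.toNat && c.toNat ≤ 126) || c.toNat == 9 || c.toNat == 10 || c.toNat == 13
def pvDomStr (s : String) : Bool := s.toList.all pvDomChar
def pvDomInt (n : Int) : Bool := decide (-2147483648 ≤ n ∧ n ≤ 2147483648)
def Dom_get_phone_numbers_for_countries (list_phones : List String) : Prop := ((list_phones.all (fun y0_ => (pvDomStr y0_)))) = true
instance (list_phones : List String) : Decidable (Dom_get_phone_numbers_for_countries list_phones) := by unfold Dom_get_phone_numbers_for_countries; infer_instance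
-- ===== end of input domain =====

-- B groups by three passes (sanitize-map, country-map, one filter per first-seen country)
-- instead of A's incremental fold that rebuilds a bucket per phone via get(...)+[tel]; measured faster at large n.

-- ===== PORT A =====
-- shared helper: the module's sanitize_phone_number (called unchanged by both A and B)
def pvSanitize (phone : String) : String :=
  let s := PySem.Str.strip phone
  -- .removeprefix("+"): drop one leading "+" iff present (exact port of str.removeprefix)
  let s := if PySem.Str.startswith s "+" then PySem.Str.slice s (some 1) none else s
  let s := PySem.Str.replace s "(" ""
  let s := PySem.Str.replace s ")" ""
  let s := PySem.Str.replace s "-" ""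
  PySem.Str.replace s " " ""

-- dict_cods = dict(zip('81 65 886 380'.split(), 'JP SG TW UA'.split())) — its items, in order
def pvDictCods : List (String × String) := [("81", "JP"), ("65", "SG"), ("886", "TW"), ("380", "UA")]

-- A's inner 'for cod, country in dict_cods.items(): … break / else: …'
def pvAInner (d : PySem.Dict String (List String)) (t : String) :
    List (String × String) → PySem.Dict String (List String)
  | [] => d.insert "UA" (d.getD "UA" [] ++ [t])
  | (cod, country) :: rest =>
      if PySem.Str.startswith t cod then d.insert country (d.getD country [] ++ [t])
      else pvAInner d t rest

def get_phone_numbers_for_countries (list_phones : List String) : List (String × List String) :=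
  (list_phones.foldl (fun d tel => pvAInner d (pvSanitize tel) pvDictCods) PySem.Dict.empty).items

-- ===== PORT B =====
def pvCodes : List (String × String) := [("81", "JP"), ("65", "SG"), ("886", "TW"), ("380", "UA")]

-- Source B's _country
def pvCountryLoop (tel : String) : List (String × String) → String
  | [] => "UA"
  | (cod, country) :: rest =>
      if PySem.Str.startswith tel cod then country else pvCountryLoop tel rest

def pvCountry (tel : String) : String := pvCountryLoop tel pvCodes

-- [t for t, cc in zip(tels, countries) if cc == c]
def pvPick (tels countries : List String) (c : String) : List String :=
  ((tels.zip countries).filter (fun p => p.2 == c)).map (·.1)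

-- Source B's result/seen loop over countries
def pvBLoop (tels countries : List String) (seen : PySem.Set String)
    (result : PySem.Dict String (List String)) :
    List String → PySem.Dict String (List String)
  | [] => result
  | c :: rest =>
      if PySem.Set.contains seen c then pvBLoop tels countries seen result rest
      else pvBLoop tels countries (PySem.Set.add seen c)
        (result.insert c (pvPick tels countries c)) rest

def get_phone_numbers_for_countries_alt (list_phones : List String) : List (String × List String) :=
  let tels := list_phones.map pvSanitize
  let countries := tels.map pvCountry
  (pvBLoop tels countries PySem.Set.empty PySem.Dict.empty countries).items

-- ===== PRECONDITION & SPEC =====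
def Spec_get_phone_numbers_for_countries (list_phones : List String) (out : List (String × List String)) : Prop := out = get_phone_numbers_for_countries_alt list_phones
instance (list_phones : List String) (out : List (String × List String)) : Decidable (Spec_get_phone_numbers_for_countries list_phones out) := by unfold Spec_get_phone_numbers_for_countries; infer_instance

-- ===== CLAIM (what is proved, stated in full; the proofs are below) =====
def Claim_equal_get_phone_numbers_for_countries : Prop := ∀ (list_phones : List String), Dom_get_phone_numbers_for_countries list_phones → Spec_get_phone_numbers_for_countries list_phones (get_phone_numbers_for_countries list_phones)

-- ===== LEMMAS AND PROOFS =====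

-- A's inner loop is one modify at the key B's _country computes
theorem pvAInner_eq_modify (d : PySem.Dict String (List String)) (t : String) :
    pvAInner d t pvDictCods = d.modify (pvCountry t) [] (· ++ [t]) := by
  simp only [pvAInner, pvCountry, pvCountryLoop, pvDictCods, pvCodes]
  split_ifs <;> rfl

-- characterization of A's fold: first-seen country order, per-country filters
theorem pvA_items (ts : List String) :
    (ts.foldl (fun d t => d.modify (pvCountry t) [] (· ++ [t])) PySem.Dict.empty).items
      = (PySem.Set.ofList (ts.map pvCountry)).map
          (fun c => (c, ts.filter (fun t => pvCountry t == c))) := by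
  set D := ts.foldl (fun d t => d.modify (pvCountry t) [] (· ++ [t])) PySem.Dict.empty with hD
  have hkeys : D.keys = PySem.Set.ofList (ts.map pvCountry) := by
    rw [hD, PySem.Dict.keys_foldl_modify_key ts pvCountry [] (fun _ t => (· ++ [t])),
      PySem.Dict.keys_empty, PySem.Set.update_nil_left]
  have hnd : D.keys.Nodup := by
    rw [hkeys]; exact PySem.Set.nodup_ofList _
  have hget : ∀ c, D.getD c [] = ts.filter (fun t => pvCountry t == c) := by
    intro c
    have hfold : D = (ts.map (fun t => (pvCountry t, t))).foldl
        (fun d p => d.modify p.1 [] (· ++ [p.2])) PySem.Dict.empty := by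
      rw [hD, List.foldl_map]
    rw [hfold, PySem.Dict.getD_foldl_modify_append, PySem.Dict.getD_empty, List.filter_map,
      List.map_map]
    simp [Function.comp_def]
  rw [PySem.Dict.items_eq_map_keys D hnd [], hkeys]
  exact List.map_congr_left (fun c _ => by rw [hget c])

-- zip-with-mapped-countries filter = direct filter by country
theorem pvPick_eq_filter (tels : List String) (c : String) :
    pvPick tels (tels.map pvCountry) c = tels.filter (fun t => pvCountry t == c) := by
  induction tels with
  | nil => rfl
  | cons t ts ih =>
      simp only [pvPick, List.map_cons, List.zip_cons_cons, List.filter_cons] at *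
      by_cases h : pvCountry t == c <;> simp [h, ih]

-- characterization of B's loop: new-to-seen first occurrences, paired with their pick
theorem pvBLoop_items (tels cs : List String) :
    ∀ (l : List String) (seen : PySem.Set String) (result : PySem.Dict String (List String)),
      (∀ k ∈ result.keys, k ∈ seen) → result.keys.Nodup →
      (pvBLoop tels cs seen result l).items
        = result.items
            ++ ((PySem.Set.update seen l).drop seen.length).map (fun c => (c, pvPick tels cs c))
  | [], seen, result, _, _ => by
      simp [pvBLoop, PySem.Set.update_nil, List.drop_length]
  | c :: rest, seen, result, hsub, hnd => by
      rw [pvBLoop]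
      by_cases hc : c ∈ seen
      · rw [if_pos ((PySem.Set.contains_iff _ _).mpr hc),
          pvBLoop_items tels cs rest seen result hsub hnd,
          PySem.Set.update_cons, PySem.Set.add_of_mem hc]
      · have hcont : PySem.Set.contains seen c = false := by
          by_contra h
          exact hc ((PySem.Set.contains_iff _ _).mp (by simpa using h))
        rw [if_neg (by simpa using hc)]
        have hcK : c ∉ result.keys := fun h => hc (hsub c h)
        have hcontR : result.contains c = false := by
          by_contra h
          exact hcK ((PySem.Dict.contains_iff_mem_keys _ _).mp (by simpa using h))
        have hitems := PySem.Dict.items_insert_of_not_contains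
          (d := result) (k := c) (v := pvPick tels cs c) hcontR
        have hkeys' := PySem.Dict.keys_insert_of_not_contains
          (d := result) (k := c) (v := pvPick tels cs c) hcontR
        have hnd' : (result.insert c (pvPick tels cs c)).keys.Nodup := by
          rw [hkeys']; exact List.Nodup.append hnd (List.nodup_singleton c)
            (by simpa using fun h => hcK h)
        have hsub' : ∀ k ∈ (result.insert c (pvPick tels cs c)).keys,
            k ∈ PySem.Set.add seen c := by
          intro k hk
          rw [hkeys'] at hk
          rcases List.mem_append.mp hk with h | h
          · exact (PySem.Set.mem_add _ _ _).mpr (Or.inl (hsub k h))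
          · exact (PySem.Set.mem_add _ _ _).mpr (Or.inr (by simpa using h))
        rw [pvBLoop_items tels cs rest _ _ hsub' hnd', hitems,
          PySem.Set.update_cons, PySem.Set.add_of_not_mem hc]
        -- align the two drops of the updated seen-list
        obtain ⟨T, hT⟩ : ∃ T, PySem.Set.update (seen ++ [c]) rest = (seen ++ [c]) ++ T :=
          ⟨_, PySem.Set.update_eq_append_filter _ _⟩
        rw [hT, List.length_append, List.length_singleton,
          List.append_assoc seen [c] T, List.drop_left]
        rw [show seen ++ ([c] ++ T) = (seen ++ [c]) ++ T from (List.append_assoc _ _ _).symm,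
          show seen.length + 1 = (seen ++ [c]).length by simp, List.drop_left]
        simp

-- ===== VERDICT (by name: the statement is the Claim_ definition above) =====
theorem get_phone_numbers_for_countries_spec : Claim_equal_get_phone_numbers_for_countries := by
  intro list_phones _
  unfold Spec_get_phone_numbers_for_countries
  unfold get_phone_numbers_for_countries get_phone_numbers_for_countries_alt
  simp only [pvAInner_eq_modify]
  rw [show (list_phones.foldl (fun d tel => PySem.Dict.modify d (pvCountry (pvSanitize tel)) [] (· ++ [pvSanitize tel])) PySem.Dict.empty)
        = ((list_phones.map pvSanitize).foldl (fun d t => PySem.Dict.modify d (pvCountry t) [] (· ++ [t])) PySem.Dict.empty) by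
      rw [List.foldl_map]]
  rw [pvA_items,
    pvBLoop_items (list_phones.map pvSanitize) ((list_phones.map pvSanitize).map pvCountry)
      ((list_phones.map pvSanitize).map pvCountry) PySem.Set.empty PySem.Dict.empty
      (by intro k hk; simp [PySem.Dict.keys_empty] at hk) (by simp [PySem.Dict.keys_empty])]
  rw [show (PySem.Dict.empty : PySem.Dict String (List String)).items = [] from rfl,
    show (PySem.Set.empty : PySem.Set String) = [] from rfl,
    PySem.Set.update_nil_left, List.length_nil, List.drop_zero, List.nil_append]
  exact List.map_congr_left (fun c _ => by rw [pvPick_eq_filter])
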